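-- pv_equiv track=rewrite | github.com/jupblb/justee | scripts/generate-syllables.py | extract_n_char_syllables
-- ===== SOURCE A (Python) =====
-- def extract_n_char_syllables(graphemes, n):
--     """Extract all continuous grapheme sequences that equal n characters."""
--     syllables = []
--
--     # Try all window sizes
--     for window_size in range(1, len(graphemes) + 1):
--         for start in range(len(graphemes) - window_size + 1):
--             window = graphemes[start : start + window_size]
--             syllable = "".join(window)
--             if len(syllable) == n:
--                 syllables.append(syllable)
--
--     return syllables
-- ===== SOURCE B (Python) =====
-- def extract_n_char_syllables(graphemes, n):
--     """Extract all continuous grapheme sequences that equal n characters."""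
--     # One pass per start with a running character total and early break,
--     # then order the matched (window_size, start) pairs as A enumerates them.
--     matches = []
--     for start in range(len(graphemes)):
--         total = 0
--         size = 0
--         for g in graphemes[start:]:
--             total += len(g)
--             size += 1
--             if total > n:
--                 break
--             if total == n:
--                 matches.append((size, start))
--     matches.sort()
--     return ["".join(graphemes[start:start + size]) for size, start in matches]
-- ===== Notes on version B (the rewrite author's own statement) =====
-- stated objective: faster
-- what changed: Instead of slicing and joining every window of every size (cubic), B makes one pass per start position keeping a running character total with an early break once the total exceeds n, collects matched (window_size, start) pairs, sorts them to A's size-major order, and joins only the matching windows.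
import Mathlib
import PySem

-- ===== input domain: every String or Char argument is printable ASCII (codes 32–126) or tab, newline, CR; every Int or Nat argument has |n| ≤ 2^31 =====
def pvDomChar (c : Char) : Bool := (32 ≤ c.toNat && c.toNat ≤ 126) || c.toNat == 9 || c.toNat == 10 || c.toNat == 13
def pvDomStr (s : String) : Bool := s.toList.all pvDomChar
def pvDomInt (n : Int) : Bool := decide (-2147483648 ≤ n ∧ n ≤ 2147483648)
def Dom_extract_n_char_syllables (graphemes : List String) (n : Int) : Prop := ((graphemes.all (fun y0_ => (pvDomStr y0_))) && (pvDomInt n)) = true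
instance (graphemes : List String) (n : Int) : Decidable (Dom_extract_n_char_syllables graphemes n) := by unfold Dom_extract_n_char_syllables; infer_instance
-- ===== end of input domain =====

-- B replaces A's cubic slice-join-measure of every window by one pass per start with a
-- running character total and early break, ordering the matched (size, start) pairs afterwards
-- (faster: only matching windows are ever joined).

-- ===== PORT A =====
def extract_n_char_syllables (graphemes : List String) (n : Int) : List String :=
  (PySem.List.pyRange 1 (PySem.List.len graphemes + 1) 1).foldl (fun syllables window_size =>
    (PySem.List.pyRange 0 (PySem.List.len graphemes - window_size + 1) 1).foldl (fun syllables start =>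
      let window := PySem.List.slice graphemes (some start) (some (start + window_size))
      let syllable := PySem.Str.join "" window
      if PySem.Str.len syllable = n then syllables ++ [syllable] else syllables) syllables) []

-- ===== PORT B =====
-- inner 'for g in graphemes[start:]: … break …' of Source B
def pvAltScan (n start : Int) (gs : List String) (total size : Int)
    (ms : List (Int × Int)) : List (Int × Int) :=
  match gs with
  | [] => ms
  | g :: rest =>
    let total := total + PySem.Str.len g
    let size := size + 1
    if total > n then ms
    else pvAltScan n start rest total size
      (if total = n then ms ++ [(size, start)] else ms)

def extract_n_char_syllables_alt (graphemes : List String) (n : Int) : List String :=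
  let ms := (PySem.List.pyRange 0 (PySem.List.len graphemes) 1).foldl
    (fun m start => pvAltScan n start (PySem.List.slice graphemes (some start) none) 0 0 m) []
  (PySem.List.sorted2 ms (fun p => p.1) (fun p => p.2)).map
    (fun p => PySem.Str.join "" (PySem.List.slice graphemes (some p.2) (some (p.2 + p.1))))

-- ===== PRECONDITION & SPEC =====
def Spec_extract_n_char_syllables (graphemes : List String) (n : Int) (out : List String) : Prop := out = extract_n_char_syllables_alt graphemes n
instance (graphemes : List String) (n : Int) (out : List String) : Decidable (Spec_extract_n_char_syllables graphemes n out) := by unfold Spec_extract_n_char_syllables; infer_instance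

-- ===== CLAIM (what is proved, stated in full; the proofs are below) =====
def Claim_equal_extract_n_char_syllables : Prop := ∀ (graphemes : List String) (n : Int), Dom_extract_n_char_syllables graphemes n → Spec_extract_n_char_syllables graphemes n (extract_n_char_syllables graphemes n)

-- ===== LEMMAS AND PROOFS =====

-- total character length of a list of graphemes
def pvSumLen (l : List String) : Int := (l.map PySem.Str.len).sum

-- the joined window at (size, start)
def pvJ (g : List String) (p : Int × Int) : String :=
  PySem.Str.join "" (PySem.List.slice g (some p.2) (some (p.2 + p.1)))

-- the matched (size, start) pairs in A's (size-major) order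
def pvM (g : List String) (n : Int) : List (Int × Int) :=
  (PySem.List.pyRange 1 (PySem.List.len g + 1) 1).flatMap (fun w =>
    ((PySem.List.pyRange 0 (PySem.List.len g - w + 1) 1).filter
      (fun st => decide (pvSumLen (PySem.List.slice g (some st) (some (st + w))) = n))).map
      (fun st => (w, st)))

-- the matched pairs one start contributes in B
def pvP (g : List String) (n st : Int) : List (Int × Int) :=
  (List.range (g.length - st.toNat)).filterMap (fun k =>
    if pvSumLen ((g.drop st.toNat).take (k + 1)) = n then some (((k : Int) + 1, st)) else none)

-- membership condition shared by both enumerations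
def pvC (g : List String) (n : Int) (p : Int × Int) : Prop :=
  1 ≤ p.1 ∧ 0 ≤ p.2 ∧ p.2 + p.1 ≤ (g.length : Int) ∧
    pvSumLen ((g.drop p.2.toNat).take p.1.toNat) = n

lemma pv_joinLen (css : List (List Char)) :
    (PySem.Chars.join [] css).length = (css.map List.length).sum := by
  induction css with
  | nil => simp [PySem.Chars.join_nil]
  | cons c rest ih =>
    cases rest with
    | nil => simp [PySem.Chars.join_singleton]
    | cons d r =>
      rw [PySem.Chars.join_cons_cons]
      simp_all

lemma pv_len_join (l : List String) : PySem.Str.len (PySem.Str.join "" l) = pvSumLen l := by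
  have h : ("" : String).toList = [] := rfl
  simp [PySem.Str.len_eq, PySem.Str.toList_join, h, pv_joinLen, pvSumLen]
  congr 1

lemma pv_sumLen_nonneg (l : List String) : 0 ≤ pvSumLen l := by
  apply List.sum_nonneg
  intro x hx
  simp [List.mem_map] at hx
  obtain ⟨s, _, rfl⟩ := hx
  simp

lemma pvAltScan_spec (n st : Int) (gs : List String) :
    ∀ (t s : Int) (m : List (Int × Int)),
      pvAltScan n st gs t s m = m ++ (List.range gs.length).filterMap (fun k =>
        if t + pvSumLen (gs.take (k + 1)) = n then some ((s + (k : Int) + 1, st)) else none) := by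
  induction gs with
  | nil => intro t s m; simp [pvAltScan]
  | cons g rest ih =>
    intro t s m
    rw [pvAltScan]
    have hsum : ∀ k, pvSumLen ((g :: rest).take (k + 1)) = PySem.Str.len g + pvSumLen (rest.take k) := by
      intro k; simp [pvSumLen, List.take_succ_cons]
    by_cases hbr : t + PySem.Str.len g > n
    · rw [if_pos hbr]
      have : ∀ k ∈ List.range (g :: rest).length,
          (if t + pvSumLen ((g :: rest).take (k + 1)) = n then some ((s + (k : Int) + 1, st) : Int × Int) else none) = none := by
        intro k _
        rw [if_neg]
        have := pv_sumLen_nonneg (rest.take k)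
        rw [hsum k]; omega
      rw [List.filterMap_eq_nil_iff.mpr this]; simp
    · rw [if_neg hbr, ih]
      simp only [List.length_cons, List.range_succ_eq_map, List.filterMap_cons,
        List.filterMap_map]
      rw [hsum 0]
      simp only [pvSumLen, List.take_zero, List.map_nil, List.sum_nil, add_zero]
      by_cases heq : t + PySem.Str.len g = n
      · rw [if_pos heq, if_pos (by omega : t + PySem.Str.len g = n)]
        simp only [List.append_assoc, List.singleton_append]
        congr 2
        · norm_num
        · apply List.filterMap_congr
          intro k _
          simp only [Function.comp_apply, Nat.succ_eq_add_one, List.take_succ_cons, List.map_cons, List.sum_cons]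
          split_ifs with h1 h2 <;> try omega
          · simp only [Option.some.injEq, Prod.mk.injEq]
            exact ⟨by push_cast; ring, trivial⟩
          · rfl
      · rw [if_neg heq, if_neg (by omega : ¬ (t + PySem.Str.len g = n))]
        congr 1
        apply List.filterMap_congr
        intro k _
        simp only [Function.comp_apply, Nat.succ_eq_add_one, List.take_succ_cons, List.map_cons, List.sum_cons]
        split_ifs with h1 h2 <;> try omega
        · simp only [Option.some.injEq, Prod.mk.injEq]
          exact ⟨by push_cast; ring, trivial⟩
        · rfl

lemma pv_matches_eq (g : List String) (n : Int) :
    (PySem.List.pyRange 0 (PySem.List.len g) 1).foldl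
      (fun m start => pvAltScan n start (PySem.List.slice g (some start) none) 0 0 m) []
    = (PySem.List.pyRange 0 (PySem.List.len g) 1).flatMap (pvP g n) := by
  rw [PySem.List.foldl_congr_mem _ _ (fun m st => m ++ pvP g n st) _ ?_]
  · rw [PySem.List.foldl_append_eq_flatMap]
    simp
  · intro acc st hst
    have h0 : 0 ≤ st := (PySem.List.mem_pyRange_one.mp hst).1
    rw [PySem.List.slice_from _ h0, pvAltScan_spec]
    simp only [pvP, List.length_drop]
    congr 1
    apply List.filterMap_congr
    intro k _
    simp only [zero_add]

lemma pv_A_eq (g : List String) (n : Int) :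
    extract_n_char_syllables g n = (pvM g n).map (pvJ g) := by
  simp only [extract_n_char_syllables, pv_len_join]
  rw [show (fun (syllables : List String) (window_size : Int) =>
        (PySem.List.pyRange 0 (PySem.List.len g - window_size + 1) 1).foldl (fun syllables start =>
          if pvSumLen (PySem.List.slice g (some start) (some (start + window_size))) = n
          then syllables ++ [PySem.Str.join "" (PySem.List.slice g (some start) (some (start + window_size)))]
          else syllables) syllables)
      = fun (acc : List String) (w : Int) => acc ++
          ((PySem.List.pyRange 0 (PySem.List.len g - w + 1) 1).filter
            (fun st => decide (pvSumLen (PySem.List.slice g (some st) (some (st + w))) = n))).map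
            (fun st => PySem.Str.join "" (PySem.List.slice g (some st) (some (st + w))))
      from funext fun acc => funext fun w => PySem.List.foldl_append_ite _ _ _ _]
  rw [PySem.List.foldl_append_eq_flatMap]
  simp [pvM, List.map_flatMap, List.map_map, Function.comp_def, pvJ]

lemma pv_mem_pvP (g : List String) (n st : Int) (q : Int × Int) :
    q ∈ pvP g n st ↔ ∃ k : Nat, k < g.length - st.toNat ∧
      pvSumLen ((g.drop st.toNat).take (k + 1)) = n ∧ q = ((k : Int) + 1, st) := by
  simp only [pvP, List.mem_filterMap, List.mem_range]
  constructor
  · rintro ⟨k, hk, hq⟩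
    by_cases hc : pvSumLen ((g.drop st.toNat).take (k + 1)) = n
    · rw [if_pos hc] at hq
      exact ⟨k, hk, hc, (Option.some_inj.mp hq).symm⟩
    · rw [if_neg hc] at hq
      exact absurd hq (by simp)
  · rintro ⟨k, hk, hc, rfl⟩
    exact ⟨k, hk, by rw [if_pos hc]⟩

lemma pv_mem_pvM (g : List String) (n : Int) (p : Int × Int) :
    p ∈ pvM g n ↔ pvC g n p := by
  simp only [pvM, List.mem_flatMap, List.mem_map, List.mem_filter,
    PySem.List.mem_pyRange_one, PySem.List.len_eq, decide_eq_true_eq, pvC]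
  constructor
  · rintro ⟨w, ⟨h1, h2⟩, st, ⟨⟨h3, h4⟩, hc⟩, rfl⟩
    refine ⟨h1, h3, by omega, ?_⟩
    rw [PySem.List.slice_toNat _ h3 (by omega)] at hc
    have ht : (st + w).toNat - st.toNat = w.toNat := by omega
    rw [ht] at hc
    exact hc
  · rintro ⟨h1, h2, h3, hc⟩
    refine ⟨p.1, ⟨h1, by omega⟩, p.2, ⟨⟨h2, by omega⟩, ?_⟩, rfl⟩
    rw [PySem.List.slice_toNat _ h2 (by omega)]
    have ht : (p.2 + p.1).toNat - p.2.toNat = p.1.toNat := by omega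
    rw [ht]
    exact hc

lemma pv_mem_flatMapP (g : List String) (n : Int) (p : Int × Int) :
    p ∈ (PySem.List.pyRange 0 (PySem.List.len g) 1).flatMap (pvP g n) ↔ pvC g n p := by
  simp only [List.mem_flatMap, PySem.List.mem_pyRange_one, PySem.List.len_eq, pv_mem_pvP, pvC]
  constructor
  · rintro ⟨st, ⟨h0, h1⟩, k, hk, hc, rfl⟩
    refine ⟨by omega, h0, by omega, ?_⟩
    have ht : ((k : Int) + 1).toNat = k + 1 := by omega
    simpa [ht] using hc
  · rintro ⟨h1, h2, h3, hc⟩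
    refine ⟨p.2, ⟨h2, by omega⟩, p.1.toNat - 1, by omega, ?_, ?_⟩
    · have ht : p.1.toNat - 1 + 1 = p.1.toNat := by omega
      rw [ht]
      exact hc
    · have hcast : ((p.1.toNat - 1 : Nat) : Int) + 1 = p.1 := by omega
      rw [hcast]

lemma pv_pairwise_pvM (g : List String) (n : Int) :
    (pvM g n).Pairwise (fun a b => toLex a < toLex b) := by
  rw [pvM]
  apply List.pairwise_flatMap.mpr
  constructor
  · intro w _
    rw [List.pairwise_map]
    apply ((PySem.List.pairwise_lt_pyRange_one _ _).filter _).imp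
    intro a b hab
    exact Prod.Lex.lt_iff.mpr (Or.inr ⟨rfl, hab⟩)
  · apply (PySem.List.pairwise_lt_pyRange_one _ _).imp
    intro w w' hww x hx y hy
    obtain ⟨a, -, rfl⟩ := List.mem_map.mp hx
    obtain ⟨b, -, rfl⟩ := List.mem_map.mp hy
    exact Prod.Lex.lt_iff.mpr (Or.inl hww)

lemma pv_nodup_flatMapP (g : List String) (n : Int) :
    ((PySem.List.pyRange 0 (PySem.List.len g) 1).flatMap (pvP g n)).Nodup := by
  have hpair : ((PySem.List.pyRange 0 (PySem.List.len g) 1).flatMap (pvP g n)).Pairwise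
      (fun a b => toLex (a.2, a.1) < toLex (b.2, b.1)) := by
    apply List.pairwise_flatMap.mpr
    constructor
    · intro st _
      rw [pvP, List.pairwise_filterMap]
      apply (List.pairwise_lt_range).imp
      intro k k' hkk x hx y hy
      split_ifs at hx hy
      all_goals try simp at hx hy
      · subst hx
        subst hy
        simp only [Prod.Lex.lt_iff, ofLex_toLex]
        right
        exact ⟨trivial, by omega⟩
    · apply (PySem.List.pairwise_lt_pyRange_one _ _).imp
      intro st st' hss x hx y hy
      obtain ⟨k, -, -, rfl⟩ := (pv_mem_pvP g n st x).mp hx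
      obtain ⟨k', -, -, rfl⟩ := (pv_mem_pvP g n st' y).mp hy
      exact Prod.Lex.lt_iff.mpr (Or.inl hss)
  exact hpair.imp (fun h => by
    intro heq
    subst heq
    exact lt_irrefl _ h)

lemma pv_sorted2_toLex (xs : List (Int × Int)) :
    PySem.List.sorted2 xs (fun p => p.1) (fun p => p.2)
      = PySem.List.sorted xs (fun p => toLex p) := by
  rw [PySem.List.sorted_eq_foldl_insertBy, PySem.List.sorted2]
  congr 1
  funext acc x
  congr 1
  funext a b
  have : (decide (a.1 < b.1) || (!decide (b.1 < a.1) && decide (a.2 < b.2)))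
      = decide (toLex a < toLex b) := by
    by_cases h1 : a.1 < b.1 <;> by_cases h2 : b.1 < a.1 <;> by_cases h3 : a.2 < b.2 <;>
      simp [h1, h2, h3, Prod.Lex.lt_iff] <;> omega
  exact this

lemma pv_sorted_matches (g : List String) (n : Int) :
    PySem.List.sorted2 ((PySem.List.pyRange 0 (PySem.List.len g) 1).flatMap (pvP g n))
      (fun p => p.1) (fun p => p.2) = pvM g n := by
  rw [pv_sorted2_toLex]
  apply PySem.List.sorted_eq_of_perm_of_pairwise_lt
  · apply (List.perm_ext_iff_of_nodup ?_ (pv_nodup_flatMapP g n)).mpr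
    · intro p
      rw [pv_mem_pvM, pv_mem_flatMapP]
    · exact ((pv_pairwise_pvM g n).imp (fun h => by
        intro heq
        subst heq
        exact lt_irrefl _ h))
  · exact pv_pairwise_pvM g n

-- ===== VERDICT (by name: the statement is the Claim_ definition above) =====
theorem extract_n_char_syllables_spec : Claim_equal_extract_n_char_syllables := by
  intro g n _
  show extract_n_char_syllables g n = extract_n_char_syllables_alt g n
  rw [pv_A_eq, extract_n_char_syllables_alt]
  rw [pv_matches_eq, pv_sorted_matches]
  rfl
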